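-- pv_equiv track=rewrite | github.com/Jack-Gray/wordleAssist | main.py | string_logical_or
-- ===== SOURCE A (Python) =====
-- def string_logical_or(first_string, second_string, null_char=''):
--     char_results = []
--     overlap = False
--     if len(first_string) != len(second_string):
--         raise ValueError("input strings cannot have different lengths")
--     if len(null_char) > 1:
--         raise ValueError("null_char must be of length 1 or 0")
--     for first_value, second_value in zip(first_string, second_string):
--         if first_value == null_char:
--             char_results.append(second_value)
--         else:
--             if not (first_value == second_value or second_value == null_char):
--                 overlap = True
--             char_results.append(first_value)
--     return ''.join(char_results), overlap
-- ===== SOURCE B (Python) =====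
-- def string_logical_or(first_string, second_string, null_char=''):
--     if len(first_string) != len(second_string):
--         raise ValueError("input strings cannot have different lengths")
--     if len(null_char) > 1:
--         raise ValueError("null_char must be of length 1 or 0")
--
--     def merge(a, b):
--         # fill the null positions of a with the corresponding characters of b
--         return ''.join(y if x == null_char else x for x, y in zip(a, b))
--
--     forward = merge(first_string, second_string)
--     backward = merge(second_string, first_string)
--     # the merge is symmetric exactly when no position holds two distinct non-null chars
--     return forward, forward != backward
-- ===== Notes on version B (the rewrite author's own statement) =====
-- stated objective: alternative
-- what changed: B drops A's fused accumulator loop with its explicit per-position conflict predicate and instead computes the two directed merges merge(first,second) and merge(second,first), returning the forward merge and deriving overlap as the inequality of the two merges (the merge is symmetric iff no position holds two distinct non-null characters).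
import Mathlib
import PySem

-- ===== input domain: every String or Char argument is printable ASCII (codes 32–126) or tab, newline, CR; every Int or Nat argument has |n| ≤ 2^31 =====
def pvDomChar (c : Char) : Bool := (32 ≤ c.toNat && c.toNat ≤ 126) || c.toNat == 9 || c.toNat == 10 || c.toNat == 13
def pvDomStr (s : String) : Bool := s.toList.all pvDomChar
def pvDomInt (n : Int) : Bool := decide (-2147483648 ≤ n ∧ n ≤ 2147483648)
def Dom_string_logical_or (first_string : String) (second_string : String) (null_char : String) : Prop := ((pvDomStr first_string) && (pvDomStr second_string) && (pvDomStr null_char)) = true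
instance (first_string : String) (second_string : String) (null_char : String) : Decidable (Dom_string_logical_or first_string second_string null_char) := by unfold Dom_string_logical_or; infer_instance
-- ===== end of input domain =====

-- B replaces A's fused loop (merge + explicit conflict predicate) by computing both directed
-- merges and deriving overlap as their inequality; objective: alternative.

-- ===== PORT A =====
-- Python's `first_value == null_char` compares a 1-char string to null_char; exact on any input.
def pvCharEq (c : Char) (s : String) : Bool := s.toList == [c]

-- the fused for-loop of A: state = (char_results, overlap), branches in A's order
def pvALoop (null_char : String) : List (Char × Char) → List Char × Bool → List Char × Bool
  | [], st => st
  | (f, s) :: rest, st =>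
    pvALoop null_char rest
      (if pvCharEq f null_char then (st.1 ++ [s], st.2)
       else if !(f == s || pvCharEq s null_char) then (st.1 ++ [f], true)
       else (st.1 ++ [f], st.2))

def string_logical_or (first_string : String) (second_string : String) (null_char : String) : String × Bool :=
  if first_string.toList.length ≠ second_string.toList.length then ("", false)  -- Python raises ValueError; outside Pre_
  else if null_char.toList.length > 1 then ("", false)                           -- Python raises ValueError; outside Pre_
  else
    let st := pvALoop null_char (first_string.toList.zip second_string.toList) ([], false)
    (String.ofList st.1, st.2)

-- ===== PORT B =====
-- B's helper merge(a, b): fill the null positions of a from b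
def pvMerge (null_char : String) (a b : List Char) : List Char :=
  (a.zip b).map (fun p => if pvCharEq p.1 null_char then p.2 else p.1)

def string_logical_or_alt (first_string : String) (second_string : String) (null_char : String) : String × Bool :=
  if first_string.toList.length ≠ second_string.toList.length then ("", false)  -- Python raises ValueError; outside Pre_
  else if null_char.toList.length > 1 then ("", false)                           -- Python raises ValueError; outside Pre_
  else
    let forward := String.ofList (pvMerge null_char first_string.toList second_string.toList)
    let backward := String.ofList (pvMerge null_char second_string.toList first_string.toList)
    (forward, forward != backward)

-- ===== PRECONDITION & SPEC =====
-- Pre_ excludes exactly the inputs on which A raises ValueError (length mismatch, or len(null_char) > 1).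
def Pre_string_logical_or (first_string : String) (second_string : String) (null_char : String) : Prop :=
  first_string.toList.length = second_string.toList.length ∧ null_char.toList.length ≤ 1
instance (first_string : String) (second_string : String) (null_char : String) : Decidable (Pre_string_logical_or first_string second_string null_char) := by unfold Pre_string_logical_or; infer_instance

def pvWitness_string_logical_or : String × String × String := ("a-c", "xb-", "-")

def Spec_string_logical_or (first_string : String) (second_string : String) (null_char : String) (out : String × Bool) : Prop := out = string_logical_or_alt first_string second_string null_char
instance (first_string : String) (second_string : String) (null_char : String) (out : String × Bool) : Decidable (Spec_string_logical_or first_string second_string null_char out) := by unfold Spec_string_logical_or; infer_instance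

-- ===== CLAIM (what is proved, stated in full; the proofs are below) =====
def Claim_equal_string_logical_or : Prop := ∀ (first_string : String) (second_string : String) (null_char : String), Dom_string_logical_or first_string second_string null_char → Pre_string_logical_or first_string second_string null_char → Spec_string_logical_or first_string second_string null_char (string_logical_or first_string second_string null_char)

-- ===== LEMMAS AND PROOFS =====
theorem pvALoop_eq (n : String) (l : List (Char × Char)) (acc : List Char) (ov : Bool) :
    pvALoop n l (acc, ov) =
      (acc ++ l.map (fun p => if pvCharEq p.1 n then p.2 else p.1),
       ov || l.any (fun p => !pvCharEq p.1 n && p.1 != p.2 && !pvCharEq p.2 n)) := by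
  induction l generalizing acc ov with
  | nil => simp [pvALoop]
  | cons h t ih =>
    obtain ⟨f, s⟩ := h
    by_cases hf : pvCharEq f n
    · simp [pvALoop, hf, ih]
    · by_cases ho : (f == s || pvCharEq s n)
      · simp [pvALoop, hf, ho, ih]
        simp only [Bool.or_eq_true, beq_iff_eq] at ho
        rcases ho with ho | ho <;> simp [ho]
      · simp [pvALoop, hf, ho, ih]
        simp only [Bool.or_eq_true, beq_iff_eq, not_or] at ho
        simp [ho.1, ho.2]

-- A's conflict scan equals the asymmetry of B's two directed merges
theorem ofList_beq (l1 l2 : List Char) : (String.ofList l1 == String.ofList l2) = (l1 == l2) := by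
  cases h : (l1 == l2)
  · simp only [beq_eq_false_iff_ne] at h ⊢
    exact fun he => h (by simpa using congrArg String.toList he)
  · simp only [beq_iff_eq] at h; simp [h]

theorem any_eq_merge_ne (n : String) (a b : List Char) :
    (a.zip b).any (fun p => !pvCharEq p.1 n && p.1 != p.2 && !pvCharEq p.2 n) =
      !(pvMerge n a b == pvMerge n b a) := by
  induction a generalizing b with
  | nil => cases b <;> simp [pvMerge]
  | cons f a' ih =>
    cases b with
    | nil => simp [pvMerge]
    | cons s b' =>
      have hm1 : pvMerge n (f::a') (s::b') = (if pvCharEq f n then s else f) :: pvMerge n a' b' := rfl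
      have hm2 : pvMerge n (s::b') (f::a') = (if pvCharEq s n then f else s) :: pvMerge n b' a' := rfl
      have hc : ((if pvCharEq f n then s else f) == (if pvCharEq s n then f else s))
          = !(!pvCharEq f n && f != s && !pvCharEq s n) := by
        by_cases hf : pvCharEq f n <;> by_cases hs : pvCharEq s n <;>
          simp [hf, hs, bne]
        -- both characters equal the single character of null_char, hence equal
        simp [pvCharEq] at hf hs
        cases hn : n.toList with
        | nil => rw [hn] at hf; cases hf
        | cons c t => rw [hn] at hf hs; cases hf; cases hs; rfl
      simp only [List.zip_cons_cons, List.any_cons, hm1, hm2, List.cons_beq_cons, ih b', hc]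
      cases (!pvCharEq f n && f != s && !pvCharEq s n) <;>
        cases (pvMerge n a' b' == pvMerge n b' a') <;> simp

-- ===== VERDICT (by name: the statement is the Claim_ definition above) =====
theorem string_logical_or_spec : Claim_equal_string_logical_or := by
  intro f s n _ _
  unfold Spec_string_logical_or string_logical_or string_logical_or_alt
  split_ifs with h1 h2 <;> try rfl
  simp only [pvALoop_eq, Bool.false_or, List.nil_append]
  refine Prod.ext rfl ?_
  rw [any_eq_merge_ne]
  simp [bne, ofList_beq]
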